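-- pv_equiv track=rewrite | github.com/onurcangnc/PromptShotv1.0 | fusion_engine.py | format_drift_stack
-- ===== SOURCE A (Python) =====
-- from typing import List, Tuple, Any, Dict, Optional
--
-- def format_drift_stack(drifts: List[Tuple[str, str]]) -> str:
--     """Format drift stack with intensification markers."""
--     parts = ["[ELDERPLINUS DRIFT STACK - CHOREOGRAPHED]"]
--
--     current_level = None
--     for i, (drift, level) in enumerate(drifts):
--         if level != current_level:
--             current_level = level
--             if level == "[L1]":
--                 parts.append("\n--- AUTHORITY SIGNALS (L1: Low Intensity) ---")
--             elif level == "[L2]":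
--                 parts.append("\n--- CONSTRAINT RESOLUTION (L2: Medium Intensity) ---")
--             elif level == "[L3]":
--                 parts.append("\n--- OUTPUT EXPANSION (L3: Maximum Intensity) ---")
--
--         parts.append(f"{level}[{i+1:03d}] {drift}")
--
--     return "\n".join(parts)
-- ===== SOURCE B (Python) =====
-- HEADERS = {
--     "[L1]": "\n--- AUTHORITY SIGNALS (L1: Low Intensity) ---",
--     "[L2]": "\n--- CONSTRAINT RESOLUTION (L2: Medium Intensity) ---",
--     "[L3]": "\n--- OUTPUT EXPANSION (L3: Maximum Intensity) ---",
-- }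
--
-- def _split_runs(drifts):
--     """Stage 1: run-length group the list into maximal runs of equal level."""
--     runs = []
--     k = 0
--     n = len(drifts)
--     while k < n:
--         lv = drifts[k][1]
--         j = k
--         while j < n and drifts[j][1] == lv:
--             j += 1
--         runs.append((lv, [d for d, _ in drifts[k:j]]))
--         k = j
--     return runs
--
-- def format_drift_stack(drifts):
--     """Format drift stack with intensification markers."""
--     parts = ["[ELDERPLINUS DRIFT STACK - CHOREOGRAPHED]"]
--     idx = 0
--     # Stage 2: emit one section per run: its header (if any), then its lines.
--     for lv, group in _split_runs(drifts):
--         if lv in HEADERS: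
--             parts.append(HEADERS[lv])
--         for drift in group:
--             idx += 1
--             parts.append(f"{lv}[{idx:03d}] {drift}")
--     return "\n".join(parts)
-- ===== Notes on version B (the rewrite author's own statement) =====
-- stated objective: alternative
-- what changed: Replaces A's single stateful pass (per-item comparison against a mutable current_level) by a two-stage run-length decomposition: first split the list into maximal runs of consecutive equal levels, then emit each run as a section - one header lookup per run from a dict, followed by that run's numbered lines via a running counter.
import Mathlib
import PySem

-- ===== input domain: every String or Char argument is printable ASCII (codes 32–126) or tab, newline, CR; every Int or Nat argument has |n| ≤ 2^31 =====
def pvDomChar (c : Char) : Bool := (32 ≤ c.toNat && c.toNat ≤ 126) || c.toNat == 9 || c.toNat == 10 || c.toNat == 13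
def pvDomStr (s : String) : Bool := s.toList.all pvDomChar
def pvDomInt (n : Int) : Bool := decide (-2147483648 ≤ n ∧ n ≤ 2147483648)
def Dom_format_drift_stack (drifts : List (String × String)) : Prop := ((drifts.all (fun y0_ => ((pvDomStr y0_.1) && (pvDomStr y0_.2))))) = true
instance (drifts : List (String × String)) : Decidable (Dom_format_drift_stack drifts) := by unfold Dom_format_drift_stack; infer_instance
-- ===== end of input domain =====

-- B replaces A's single stateful pass (mutable current_level checked per item) by a two-stage
-- run-length decomposition: split into maximal runs of equal level, then emit each run as a
-- section (header lookup once per run, then its numbered lines). Objective: alternative, same cost.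

-- the f-string "{level}[{idx:03d}] {drift}" (Python's {:03d} = str(n).zfill(3) for these values)
def pvFmt03 (n : Int) : String := PySem.Str.zfill (PySem.Int.toStr n) 3

-- ===== PORT A =====
def pvLine (i : Int) (level drift : String) : String :=
  level ++ "[" ++ pvFmt03 (i + 1) ++ "] " ++ drift

def format_drift_stack (drifts : List (String × String)) : String :=
  let parts : List String := ["[ELDERPLINUS DRIFT STACK - CHOREOGRAPHED]"]
  let st :=
    (PySem.List.enumerate drifts).foldl
      (fun (st : List String × Option String) p =>
        let parts := st.1
        let current_level := st.2
        let i := p.1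
        let drift := p.2.1
        let level := p.2.2
        let (parts, current_level) :=
          if some level ≠ current_level then
            let current_level := some level
            let parts :=
              if level = "[L1]" then
                parts ++ ["\n--- AUTHORITY SIGNALS (L1: Low Intensity) ---"]
              else if level = "[L2]" then
                parts ++ ["\n--- CONSTRAINT RESOLUTION (L2: Medium Intensity) ---"]
              else if level = "[L3]" then
                parts ++ ["\n--- OUTPUT EXPANSION (L3: Maximum Intensity) ---"]
              else parts
            (parts, current_level)
          else (parts, current_level)
        (parts ++ [pvLine i level drift], current_level))
      (parts, (none : Option String))
  PySem.Str.join "\n" st.1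

-- ===== PORT B =====
def pvHeaders : PySem.Dict String String :=
  PySem.Dict.ofList [("[L1]", "\n--- AUTHORITY SIGNALS (L1: Low Intensity) ---"),
   ("[L2]", "\n--- CONSTRAINT RESOLUTION (L2: Medium Intensity) ---"),
   ("[L3]", "\n--- OUTPUT EXPANSION (L3: Maximum Intensity) ---")]

-- stage 1 helper: the inner `while j < n and drifts[j][1] == lv` scan of _split_runs,
-- returning (drifts of the run continuing level lv, remainder of the list)
def pvSpan (lv : String) : List (String × String) → List String × List (String × String)
  | [] => ([], [])
  | (d, l) :: rest =>
      if l = lv then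
        let p := pvSpan lv rest
        (d :: p.1, p.2)
      else ([], (d, l) :: rest)

theorem pvSpan_len (lv : String) : ∀ xs : List (String × String), (pvSpan lv xs).2.length ≤ xs.length := by
  intro xs
  induction xs with
  | nil => simp [pvSpan]
  | cons x rest ih =>
    obtain ⟨d, l⟩ := x
    by_cases h : l = lv <;> simp [pvSpan, h]
    omega

-- stage 1: run-length grouping into maximal runs of consecutive equal levels
def pvSplitRuns : List (String × String) → List (String × List String)
  | [] => []
  | (d, lv) :: rest =>
      let p := pvSpan lv rest
      (lv, d :: p.1) :: pvSplitRuns p.2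
termination_by xs => xs.length
decreasing_by
  simp only [List.length_cons]
  exact Nat.lt_succ_of_le (pvSpan_len lv rest)

def format_drift_stack_alt (drifts : List (String × String)) : String :=
  let st :=
    (pvSplitRuns drifts).foldl
      (fun (st : List String × Int) run =>
        let lv := run.1
        let parts :=
          if (PySem.Dict.get? pvHeaders lv).isSome then
            st.1 ++ [PySem.Dict.getD pvHeaders lv ""]
          else st.1
        run.2.foldl
          (fun (st : List String × Int) drift =>
            let idx := st.2 + 1
            (st.1 ++ [lv ++ "[" ++ pvFmt03 idx ++ "] " ++ drift], idx))
          (parts, st.2))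
      (["[ELDERPLINUS DRIFT STACK - CHOREOGRAPHED]"], (0 : Int))
  PySem.Str.join "\n" st.1

-- ===== PRECONDITION & SPEC =====
def Spec_format_drift_stack (drifts : List (String × String)) (out : String) : Prop := out = format_drift_stack_alt drifts
instance (drifts : List (String × String)) (out : String) : Decidable (Spec_format_drift_stack drifts out) := by unfold Spec_format_drift_stack; infer_instance

-- ===== CLAIM (what is proved, stated in full; the proofs are below) =====
def Claim_equal_format_drift_stack : Prop := ∀ (drifts : List (String × String)), Dom_format_drift_stack drifts → Spec_format_drift_stack drifts (format_drift_stack drifts)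

-- ===== LEMMAS AND PROOFS =====

def pvHdrList (level : String) : List String :=
  if level = "[L1]" then ["\n--- AUTHORITY SIGNALS (L1: Low Intensity) ---"]
  else if level = "[L2]" then ["\n--- CONSTRAINT RESOLUTION (L2: Medium Intensity) ---"]
  else if level = "[L3]" then ["\n--- OUTPUT EXPANSION (L3: Maximum Intensity) ---"]
  else []

def pvHdrIf (level : String) (prev : Option String) : List String :=
  if some level ≠ prev then pvHdrList level else []

-- canonical emitted list of lines (header + line per item, threading index and level)
def pvOut : Int → Option String → List (String × String) → List String
  | _, _, [] => []
  | i, cur, (d, lv) :: rest => pvHdrIf lv cur ++ [pvLine i lv d] ++ pvOut (i + 1) (some lv) rest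

-- the lines of one run
def pvLines : Int → String → List String → List String
  | _, _, [] => []
  | i, lv, d :: ds => pvLine i lv d :: pvLines (i + 1) lv ds

-- A's loop body, named (definitionally the lambda in the port)
def pvStepA (st : List String × Option String) (p : Int × (String × String)) :
    List String × Option String :=
  let parts := st.1
  let current_level := st.2
  let i := p.1
  let drift := p.2.1
  let level := p.2.2
  let (parts, current_level) :=
    if some level ≠ current_level then
      let current_level := some level
      let parts :=
        if level = "[L1]" then
          parts ++ ["\n--- AUTHORITY SIGNALS (L1: Low Intensity) ---"]
        else if level = "[L2]" then
          parts ++ ["\n--- CONSTRAINT RESOLUTION (L2: Medium Intensity) ---"]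
        else if level = "[L3]" then
          parts ++ ["\n--- OUTPUT EXPANSION (L3: Maximum Intensity) ---"]
        else parts
      (parts, current_level)
    else (parts, current_level)
  (parts ++ [pvLine i level drift], current_level)

theorem stepA_eq (parts : List String) (cur : Option String) (i : Int) (d lv : String) :
    pvStepA (parts, cur) (i, (d, lv)) =
      (parts ++ (pvHdrIf lv cur ++ [pvLine i lv d]), some lv) := by
  by_cases h : some lv ≠ cur
  · simp only [pvStepA, pvHdrIf, pvHdrList, if_pos h]
    split_ifs <;> simp
  · rw [not_not] at h
    simp [pvStepA, pvHdrIf, ← h]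

theorem foldA (rest : List (String × String)) :
    ∀ (i : Int) (cur : Option String) (parts : List String),
      ((PySem.List.enumerate rest i).foldl pvStepA (parts, cur)).1 =
        parts ++ pvOut i cur rest := by
  induction rest with
  | nil => intro i cur parts; simp [PySem.List.enumerate_nil, pvOut]
  | cons x rest ih =>
    intro i cur parts
    obtain ⟨d, lv⟩ := x
    rw [PySem.List.enumerate_cons, List.foldl_cons, stepA_eq, ih, pvOut]
    simp [List.append_assoc]

theorem formatA_eq (drifts : List (String × String)) :
    format_drift_stack drifts =
      PySem.Str.join "\n"
        ("[ELDERPLINUS DRIFT STACK - CHOREOGRAPHED]" :: pvOut 0 none drifts) := by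
  show PySem.Str.join "\n"
      (((PySem.List.enumerate drifts).foldl pvStepA
        (["[ELDERPLINUS DRIFT STACK - CHOREOGRAPHED]"], (none : Option String))).1) = _
  rw [foldA drifts 0 none]
  rfl

-- B-side lemmas --

theorem pvHeaders_mk :
    pvHeaders = PySem.Dict.mk
      [("[L1]", "\n--- AUTHORITY SIGNALS (L1: Low Intensity) ---"),
       ("[L2]", "\n--- CONSTRAINT RESOLUTION (L2: Medium Intensity) ---"),
       ("[L3]", "\n--- OUTPUT EXPANSION (L3: Maximum Intensity) ---")] := by rfl

theorem header_eq (lv : String) (parts : List String) :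
    (if (PySem.Dict.get? pvHeaders lv).isSome then
        parts ++ [PySem.Dict.getD pvHeaders lv ""]
      else parts) = parts ++ pvHdrList lv := by
  by_cases h1 : lv = "[L1]"
  · subst h1; simp [pvHdrList, pvHeaders_mk, PySem.Dict.get?_mk_cons, PySem.Dict.getD]
  · by_cases h2 : lv = "[L2]"
    · subst h2; simp [pvHdrList, pvHeaders_mk, PySem.Dict.get?_mk_cons, PySem.Dict.getD]
    · by_cases h3 : lv = "[L3]"
      · subst h3; simp [pvHdrList, pvHeaders_mk, PySem.Dict.get?_mk_cons, PySem.Dict.getD]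
      · simp [pvHdrList, h1, h2, h3, pvHeaders_mk, PySem.Dict.get?]
        exact ⟨fun e => h1 e.symm, fun e => h2 e.symm, fun e => h3 e.symm⟩

-- B's inner per-run loop
theorem innerB (lv : String) (ds : List String) :
    ∀ (parts : List String) (i : Int),
      ds.foldl
        (fun (st : List String × Int) drift =>
          let idx := st.2 + 1
          (st.1 ++ [lv ++ "[" ++ pvFmt03 idx ++ "] " ++ drift], idx))
        (parts, i) = (parts ++ pvLines i lv ds, i + ds.length) := by
  induction ds with
  | nil => intro parts i; simp [pvLines]
  | cons d ds ih =>
    intro parts i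
    rw [List.foldl_cons, ih]
    simp only [pvLines, Prod.mk.injEq]
    constructor
    · simp [pvLine, List.append_assoc]
    · simp only [List.length_cons]; push_cast; omega

theorem span_out (lv : String) : ∀ (xs : List (String × String)) (i : Int),
    pvOut i (some lv) xs =
      pvLines i lv (pvSpan lv xs).1 ++
        pvOut (i + (pvSpan lv xs).1.length) (some lv) (pvSpan lv xs).2 := by
  intro xs
  induction xs with
  | nil => intro i; simp [pvSpan, pvLines, pvOut]
  | cons x rest ih =>
    intro i
    obtain ⟨d, l⟩ := x
    by_cases h : l = lv
    · subst h
      have hsp : pvSpan l ((d, l) :: rest) = (d :: (pvSpan l rest).1, (pvSpan l rest).2) := by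
        simp [pvSpan]
      have hif : pvHdrIf l (some l) = [] := by simp [pvHdrIf]
      rw [hsp, pvOut, hif, ih (i + 1)]
      have hc : pvLines i l (d :: (pvSpan l rest).1) =
          pvLine i l d :: pvLines (i + 1) l (pvSpan l rest).1 := rfl
      rw [hc]
      simp only [List.length_cons]
      simp only [List.cons_append, List.append_assoc]
      push_cast
      ring_nf
      simp
    · simp [pvSpan, h, pvLines]

theorem span_head (lv : String) : ∀ (xs : List (String × String)) (d' l' : String) (rest' : List (String × String)),
    (pvSpan lv xs).2 = (d', l') :: rest' → l' ≠ lv := by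
  intro xs
  induction xs with
  | nil => intro d' l' rest' h; simp [pvSpan] at h
  | cons x rest ih =>
    obtain ⟨d, l⟩ := x
    intro d' l' rest' h
    by_cases hl : l = lv
    · rw [pvSpan, if_pos hl] at h; exact ih d' l' rest' h
    · rw [pvSpan, if_neg hl] at h
      cases h; exact hl

theorem span_len_eq (lv : String) : ∀ (xs : List (String × String)),
    (pvSpan lv xs).1.length + (pvSpan lv xs).2.length = xs.length := by
  intro xs
  induction xs with
  | nil => simp [pvSpan]
  | cons x rest ih =>
    obtain ⟨d, l⟩ := x
    by_cases h : l = lv <;> simp [pvSpan, h]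
    omega

-- B's outer loop over runs equals the canonical output
def pvStepB (st : List String × Int) (run : String × List String) : List String × Int :=
  let lv := run.1
  let parts :=
    if (PySem.Dict.get? pvHeaders lv).isSome then
      st.1 ++ [PySem.Dict.getD pvHeaders lv ""]
    else st.1
  run.2.foldl
    (fun (st : List String × Int) drift =>
      let idx := st.2 + 1
      (st.1 ++ [lv ++ "[" ++ pvFmt03 idx ++ "] " ++ drift], idx))
    (parts, st.2)

theorem stepB_eq (parts : List String) (i : Int) (lv : String) (ds : List String) :
    pvStepB (parts, i) (lv, ds) =
      ((parts ++ pvHdrList lv) ++ pvLines i lv ds, i + ds.length) := by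
  simp only [pvStepB]
  rw [header_eq, innerB]

theorem foldB (xs : List (String × String)) :
    ∀ (parts : List String) (i : Int) (cur : Option String),
      (∀ d lv rest, xs = (d, lv) :: rest → some lv ≠ cur) →
      (pvSplitRuns xs).foldl pvStepB (parts, i) =
        (parts ++ pvOut i cur xs, i + xs.length) := by
  induction xs using pvSplitRuns.induct with
  | case1 => intro parts i cur _; simp [pvSplitRuns, pvOut]
  | case2 d lv rest p ih =>
    have hp : p = pvSpan lv rest := rfl
    intro parts i cur hcur
    rw [pvSplitRuns]
    simp only [← hp]
    rw [List.foldl_cons, stepB_eq, ih _ _ (some lv) ?_]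
    · have hout : pvOut i cur ((d, lv) :: rest) =
          (pvHdrList lv ++ pvLines i lv (d :: p.1)) ++
            pvOut (i + (d :: p.1).length) (some lv) p.2 := by
        rw [pvOut, pvHdrIf, if_pos (hcur d lv rest rfl), span_out lv rest (i + 1), ← hp]
        simp only [pvLines, List.length_cons, List.cons_append, List.append_assoc]
        have : (i + ((p.1.length : ℤ) + 1)) = i + 1 + (p.1.length : ℤ) := by omega
        push_cast
        rw [this]
        simp
      rw [hout]
      have hlen := span_len_eq lv rest
      rw [← hp] at hlen
      simp only [Prod.mk.injEq, List.length_cons]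
      constructor
      · simp [List.append_assoc]
      · push_cast; omega
    · intro d' l' rest' h2
      have := span_head lv rest d' l' rest' (by rw [← hp, h2])
      simp [this]

-- ===== VERDICT (by name: the statement is the Claim_ definition above) =====
theorem format_drift_stack_spec : Claim_equal_format_drift_stack := by
  intro drifts _
  unfold Spec_format_drift_stack
  show format_drift_stack drifts = format_drift_stack_alt drifts
  rw [formatA_eq]
  show _ = PySem.Str.join "\n"
      ((pvSplitRuns drifts).foldl pvStepB
        (["[ELDERPLINUS DRIFT STACK - CHOREOGRAPHED]"], (0 : Int))).1
  rw [foldB drifts _ 0 none (by intro d lv rest _; simp)]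
  rfl
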